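-- pv_equiv track=rewrite | github.com/Pivot12/SimFreeAutoRegAdvisor2 | utils/firecrawl_utils.py | extract_category_from_query
-- ===== SOURCE A (Python) =====
-- def extract_category_from_query(query: str) -> str:
--     """Extract category information from query for Interregs search."""
--     query_lower = query.lower()
--
--     if any(term in query_lower for term in ['emission', 'exhaust', 'co2', 'pollution']):
--         return 'Emissions'
--     elif any(term in query_lower for term in ['safety', 'crash', 'protection']):
--         return 'Safety'
--     elif any(term in query_lower for term in ['homologation', 'type approval', 'certification']):
--         return 'Homologation'
--     elif any(term in query_lower for term in ['electric', 'ev', 'battery']):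
--         return 'Electric Vehicles'
--     elif any(term in query_lower for term in ['fuel', 'gasoline', 'diesel']):
--         return 'Fuel'
--     elif any(term in query_lower for term in ['noise', 'sound']):
--         return 'Noise'
--     elif any(term in query_lower for term in ['light', 'lamp', 'illumination']):
--         return 'Lighting'
--     else:
--         return 'General'
-- ===== SOURCE B (Python) =====
-- _PRIORITY = ['Emissions', 'Safety', 'Homologation', 'Electric Vehicles', 'Fuel', 'Noise', 'Lighting']
--
-- _TERM_RANK = [
--     ('emission', 0), ('exhaust', 0), ('co2', 0), ('pollution', 0),
--     ('safety', 1), ('crash', 1), ('protection', 1),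
--     ('homologation', 2), ('type approval', 2), ('certification', 2),
--     ('electric', 3), ('ev', 3), ('battery', 3),
--     ('fuel', 4), ('gasoline', 4), ('diesel', 4),
--     ('noise', 5), ('sound', 5),
--     ('light', 6), ('lamp', 6), ('illumination', 6),
-- ]
--
-- def extract_category_from_query(query: str) -> str:
--     """Extract category information from query for Interregs search.
--
--     Exhaustively collects the priority rank of every keyword occurring in the
--     query and returns the category of the best (lowest) rank; no early exit,
--     no branch chain."""
--     q = query.lower()
--     hits = [rank for term, rank in _TERM_RANK if term in q]
--     if not hits:
--         return 'General'
--     return _PRIORITY[min(hits)]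
-- ===== Notes on version B (the rewrite author's own statement) =====
-- stated objective: alternative
-- what changed: Instead of A's first-match if/elif chain, B exhaustively collects the priority rank of every matching keyword from a flat (term, rank) list and returns the category of the minimum rank (General if no keyword matches).
import Mathlib
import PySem

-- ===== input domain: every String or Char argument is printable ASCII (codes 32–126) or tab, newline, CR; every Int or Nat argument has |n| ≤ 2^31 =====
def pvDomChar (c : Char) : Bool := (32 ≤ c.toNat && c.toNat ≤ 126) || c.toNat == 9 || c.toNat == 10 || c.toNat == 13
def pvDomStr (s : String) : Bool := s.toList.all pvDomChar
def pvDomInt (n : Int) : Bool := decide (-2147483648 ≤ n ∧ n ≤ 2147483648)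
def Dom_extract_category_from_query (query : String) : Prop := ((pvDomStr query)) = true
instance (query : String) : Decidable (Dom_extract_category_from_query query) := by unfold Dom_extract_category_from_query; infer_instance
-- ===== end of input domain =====

-- B replaces A's first-match if/elif chain by an exhaustive scan: it collects the
-- priority rank of every matching keyword and returns the category of the minimum rank.

-- ===== PORT A =====
def extract_category_from_query (query : String) : String :=
  let query_lower := PySem.Str.lower query
  if ["emission", "exhaust", "co2", "pollution"].any (fun term => PySem.Str.isIn term query_lower) then
    "Emissions"
  else if ["safety", "crash", "protection"].any (fun term => PySem.Str.isIn term query_lower) then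
    "Safety"
  else if ["homologation", "type approval", "certification"].any (fun term => PySem.Str.isIn term query_lower) then
    "Homologation"
  else if ["electric", "ev", "battery"].any (fun term => PySem.Str.isIn term query_lower) then
    "Electric Vehicles"
  else if ["fuel", "gasoline", "diesel"].any (fun term => PySem.Str.isIn term query_lower) then
    "Fuel"
  else if ["noise", "sound"].any (fun term => PySem.Str.isIn term query_lower) then
    "Noise"
  else if ["light", "lamp", "illumination"].any (fun term => PySem.Str.isIn term query_lower) then
    "Lighting"
  else
    "General"

-- ===== PORT B =====
def priorityList : List String :=
  ["Emissions", "Safety", "Homologation", "Electric Vehicles", "Fuel", "Noise", "Lighting"]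

def termRank : List (String × Int) :=
  [ ("emission", 0), ("exhaust", 0), ("co2", 0), ("pollution", 0),
    ("safety", 1), ("crash", 1), ("protection", 1),
    ("homologation", 2), ("type approval", 2), ("certification", 2),
    ("electric", 3), ("ev", 3), ("battery", 3),
    ("fuel", 4), ("gasoline", 4), ("diesel", 4),
    ("noise", 5), ("sound", 5),
    ("light", 6), ("lamp", 6), ("illumination", 6) ]

-- hits = [rank for term, rank in _TERM_RANK if term in q]
def hitsOf (q : String) : List Int :=
  termRank.filterMap (fun p => if PySem.Str.isIn p.1 q then some p.2 else none)

def extract_category_from_query_alt (query : String) : String :=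
  let q := PySem.Str.lower query
  match PySem.List.min? (hitsOf q) (fun x => x) with
  | none => "General"                                    -- `if not hits: return 'General'`
  | some m => (PySem.List.pyGet? priorityList m).getD "General"
      -- `_PRIORITY[min(hits)]`; the rank is always 0–6 so the index never raises and the default is unreachable

-- ===== PRECONDITION & SPEC =====
def Spec_extract_category_from_query (query : String) (out : String) : Prop := out = extract_category_from_query_alt query
instance (query : String) (out : String) : Decidable (Spec_extract_category_from_query query out) := by unfold Spec_extract_category_from_query; infer_instance

-- ===== CLAIM (what is proved, stated in full; the proofs are below) =====
def Claim_equal_extract_category_from_query : Prop := ∀ (query : String), Dom_extract_category_from_query query → Spec_extract_category_from_query query (extract_category_from_query query)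

-- ===== LEMMAS AND PROOFS =====

-- one category segment of the flat (term, rank) list, as its list of produced ranks
def seg (q : String) (ts : List String) (i : Int) : List Int :=
  ts.filterMap (fun t => if PySem.Str.isIn t q then some i else none)

theorem mem_seg (q : String) (ts : List String) (i x : Int) :
    x ∈ seg q ts i ↔ ((ts.any fun t => PySem.Str.isIn t q) = true ∧ x = i) := by
  induction ts with
  | nil => simp [seg]
  | cons h t ih =>
    by_cases hh : PySem.Str.isIn h q = true
    · simp_all [seg, List.any_cons]
    · simp_all [seg, List.any_cons]

def terms0 : List String := ["emission", "exhaust", "co2", "pollution"]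
def terms1 : List String := ["safety", "crash", "protection"]
def terms2 : List String := ["homologation", "type approval", "certification"]
def terms3 : List String := ["electric", "ev", "battery"]
def terms4 : List String := ["fuel", "gasoline", "diesel"]
def terms5 : List String := ["noise", "sound"]
def terms6 : List String := ["light", "lamp", "illumination"]

theorem termRank_eq :
    termRank =
      (terms0.map fun t => (t, (0:Int))) ++ (terms1.map fun t => (t, (1:Int))) ++
      (terms2.map fun t => (t, (2:Int))) ++ (terms3.map fun t => (t, (3:Int))) ++
      (terms4.map fun t => (t, (4:Int))) ++ (terms5.map fun t => (t, (5:Int))) ++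
      (terms6.map fun t => (t, (6:Int))) := rfl

set_option maxHeartbeats 1000000 in
theorem hitsOf_eq (q : String) :
    hitsOf q = seg q terms0 0 ++ seg q terms1 1 ++ seg q terms2 2 ++ seg q terms3 3 ++
               seg q terms4 4 ++ seg q terms5 5 ++ seg q terms6 6 := by
  unfold hitsOf
  rw [termRank_eq]
  simp only [List.filterMap_append, List.filterMap_map]
  rfl

theorem mem_hitsOf (q : String) (x : Int) :
    x ∈ hitsOf q ↔
      (((terms0.any fun t => PySem.Str.isIn t q) = true ∧ x = 0) ∨
       ((terms1.any fun t => PySem.Str.isIn t q) = true ∧ x = 1) ∨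
       ((terms2.any fun t => PySem.Str.isIn t q) = true ∧ x = 2) ∨
       ((terms3.any fun t => PySem.Str.isIn t q) = true ∧ x = 3) ∨
       ((terms4.any fun t => PySem.Str.isIn t q) = true ∧ x = 4) ∨
       ((terms5.any fun t => PySem.Str.isIn t q) = true ∧ x = 5) ∨
       ((terms6.any fun t => PySem.Str.isIn t q) = true ∧ x = 6)) := by
  rw [hitsOf_eq]
  simp only [List.mem_append, mem_seg, or_assoc]

-- if rank k is a hit and every hit is ≥ k, then min(hits) = k
theorem min_hits_eq (q : String) (k : Int) (hk : k ∈ hitsOf q)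
    (hge : ∀ x ∈ hitsOf q, k ≤ x) :
    PySem.List.min? (hitsOf q) (fun x => x) = some k := by
  cases h : PySem.List.min? (hitsOf q) (fun x => x) with
  | none =>
    rw [PySem.List.min?_eq_none_iff] at h
    rw [h] at hk
    simp at hk
  | some m =>
    have h1 : m ≤ k := by simpa using PySem.List.min?_isMin h k hk
    have h2 : k ≤ m := hge m (PySem.List.min?_mem h)
    exact congrArg some (le_antisymm h1 h2)

-- ===== VERDICT (by name: the statement is the Claim_ definition above) =====
set_option maxHeartbeats 1600000 in
theorem extract_category_from_query_spec : Claim_equal_extract_category_from_query := by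
  intro query _
  unfold Spec_extract_category_from_query extract_category_from_query extract_category_from_query_alt
  generalize PySem.Str.lower query = q
  show (if (terms0.any fun term => PySem.Str.isIn term q) = true then "Emissions"
    else if (terms1.any fun term => PySem.Str.isIn term q) = true then "Safety"
    else if (terms2.any fun term => PySem.Str.isIn term q) = true then "Homologation"
    else if (terms3.any fun term => PySem.Str.isIn term q) = true then "Electric Vehicles"
    else if (terms4.any fun term => PySem.Str.isIn term q) = true then "Fuel"
    else if (terms5.any fun term => PySem.Str.isIn term q) = true then "Noise"
    else if (terms6.any fun term => PySem.Str.isIn term q) = true then "Lighting"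
    else "General") =
    (match PySem.List.min? (hitsOf q) (fun x => x) with
     | none => "General"
     | some m => (PySem.List.pyGet? priorityList m).getD "General")
  by_cases h0 : (terms0.any fun t => PySem.Str.isIn t q) = true
  · rw [min_hits_eq q 0 ((mem_hitsOf q 0).2 (Or.inl ⟨h0, rfl⟩))
        (by intro x hx
            rw [mem_hitsOf] at hx
            rcases hx with ⟨ha, rfl⟩ | ⟨ha, rfl⟩ | ⟨ha, rfl⟩ | ⟨ha, rfl⟩ | ⟨ha, rfl⟩ | ⟨ha, rfl⟩ | ⟨ha, rfl⟩
            exacts [by omega, by omega, by omega, by omega, by omega, by omega, by omega]),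
        if_pos h0]
    decide
  · by_cases h1 : (terms1.any fun t => PySem.Str.isIn t q) = true
    · rw [min_hits_eq q 1 ((mem_hitsOf q 1).2 (Or.inr (Or.inl ⟨h1, rfl⟩)))
          (by intro x hx
              rw [mem_hitsOf] at hx
              rcases hx with ⟨ha, rfl⟩ | ⟨ha, rfl⟩ | ⟨ha, rfl⟩ | ⟨ha, rfl⟩ | ⟨ha, rfl⟩ | ⟨ha, rfl⟩ | ⟨ha, rfl⟩
              exacts [absurd ha h0, by omega, by omega, by omega, by omega, by omega, by omega]),
          if_neg h0, if_pos h1]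
      decide
    · by_cases h2 : (terms2.any fun t => PySem.Str.isIn t q) = true
      · rw [min_hits_eq q 2 ((mem_hitsOf q 2).2 (Or.inr (Or.inr (Or.inl ⟨h2, rfl⟩))))
            (by intro x hx
                rw [mem_hitsOf] at hx
                rcases hx with ⟨ha, rfl⟩ | ⟨ha, rfl⟩ | ⟨ha, rfl⟩ | ⟨ha, rfl⟩ | ⟨ha, rfl⟩ | ⟨ha, rfl⟩ | ⟨ha, rfl⟩
                exacts [absurd ha h0, absurd ha h1, by omega, by omega, by omega, by omega, by omega]),
            if_neg h0, if_neg h1, if_pos h2]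
        decide
      · by_cases h3 : (terms3.any fun t => PySem.Str.isIn t q) = true
        · rw [min_hits_eq q 3 ((mem_hitsOf q 3).2 (Or.inr (Or.inr (Or.inr (Or.inl ⟨h3, rfl⟩)))))
              (by intro x hx
                  rw [mem_hitsOf] at hx
                  rcases hx with ⟨ha, rfl⟩ | ⟨ha, rfl⟩ | ⟨ha, rfl⟩ | ⟨ha, rfl⟩ | ⟨ha, rfl⟩ | ⟨ha, rfl⟩ | ⟨ha, rfl⟩
                  exacts [absurd ha h0, absurd ha h1, absurd ha h2, by omega, by omega, by omega, by omega]),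
              if_neg h0, if_neg h1, if_neg h2, if_pos h3]
          decide
        · by_cases h4 : (terms4.any fun t => PySem.Str.isIn t q) = true
          · rw [min_hits_eq q 4 ((mem_hitsOf q 4).2 (Or.inr (Or.inr (Or.inr (Or.inr (Or.inl ⟨h4, rfl⟩))))))
                (by intro x hx
                    rw [mem_hitsOf] at hx
                    rcases hx with ⟨ha, rfl⟩ | ⟨ha, rfl⟩ | ⟨ha, rfl⟩ | ⟨ha, rfl⟩ | ⟨ha, rfl⟩ | ⟨ha, rfl⟩ | ⟨ha, rfl⟩
                    exacts [absurd ha h0, absurd ha h1, absurd ha h2, absurd ha h3, by omega, by omega, by omega]),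
                if_neg h0, if_neg h1, if_neg h2, if_neg h3, if_pos h4]
            decide
          · by_cases h5 : (terms5.any fun t => PySem.Str.isIn t q) = true
            · rw [min_hits_eq q 5 ((mem_hitsOf q 5).2 (Or.inr (Or.inr (Or.inr (Or.inr (Or.inr (Or.inl ⟨h5, rfl⟩)))))))
                  (by intro x hx
                      rw [mem_hitsOf] at hx
                      rcases hx with ⟨ha, rfl⟩ | ⟨ha, rfl⟩ | ⟨ha, rfl⟩ | ⟨ha, rfl⟩ | ⟨ha, rfl⟩ | ⟨ha, rfl⟩ | ⟨ha, rfl⟩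
                      exacts [absurd ha h0, absurd ha h1, absurd ha h2, absurd ha h3, absurd ha h4, by omega, by omega]),
                  if_neg h0, if_neg h1, if_neg h2, if_neg h3, if_neg h4, if_pos h5]
              decide
            · by_cases h6 : (terms6.any fun t => PySem.Str.isIn t q) = true
              · rw [min_hits_eq q 6 ((mem_hitsOf q 6).2 (Or.inr (Or.inr (Or.inr (Or.inr (Or.inr (Or.inr ⟨h6, rfl⟩)))))))
                    (by intro x hx
                        rw [mem_hitsOf] at hx
                        rcases hx with ⟨ha, rfl⟩ | ⟨ha, rfl⟩ | ⟨ha, rfl⟩ | ⟨ha, rfl⟩ | ⟨ha, rfl⟩ | ⟨ha, rfl⟩ | ⟨ha, rfl⟩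
                        exacts [absurd ha h0, absurd ha h1, absurd ha h2, absurd ha h3, absurd ha h4, absurd ha h5, by omega]),
                    if_neg h0, if_neg h1, if_neg h2, if_neg h3, if_neg h4, if_neg h5, if_pos h6]
                decide
              · have hnil : hitsOf q = [] := by
                    rw [List.eq_nil_iff_forall_not_mem]
                    intro x hx
                    rw [mem_hitsOf] at hx
                    rcases hx with ⟨ha, _⟩ | ⟨ha, _⟩ | ⟨ha, _⟩ | ⟨ha, _⟩ | ⟨ha, _⟩ | ⟨ha, _⟩ | ⟨ha, _⟩
                    exacts [h0 ha, h1 ha, h2 ha, h3 ha, h4 ha, h5 ha, h6 ha]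
                rw [show PySem.List.min? (hitsOf q) (fun x => x) = none from by
                      rw [PySem.List.min?_eq_none_iff]; exact hnil,
                    if_neg h0, if_neg h1, if_neg h2, if_neg h3, if_neg h4, if_neg h5, if_neg h6]
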